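-- pv_equiv track=rewrite | github.com/MarkSon-42/Team_ALGO | minwoo/토스기출_2022.py | solution
-- ===== SOURCE A (Python) =====
-- def solution(s):
--     cool_numbers = set()
--     for i in range(len(s) - 2):
--         substring = s[i:i+3]
--         if substring[0] == substring[1] == substring[2]:
--             cool_numbers.add(int(substring))
--     if not cool_numbers:
--         return -1
--     return max(cool_numbers)
-- ===== SOURCE B (Python) =====
-- def solution(s):
--     best = None
--     prev = None
--     run = 0
--     for ch in s:
--         run = run + 1 if ch == prev else 1
--         prev = ch
--         if run >= 3:
--             v = int(ch) * 111
--             if best is None or v > best: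
--                 best = v
--     return -1 if best is None else best
-- ===== Notes on version B (the rewrite author's own statement) =====
-- stated objective: alternative
-- what changed: Replaces A's set of int(s[i:i+3]) values over all overlapping 3-char windows (slicing plus a final max()) with a single run-length scan that keeps only a running maximum in O(1) extra space.
import Mathlib
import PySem

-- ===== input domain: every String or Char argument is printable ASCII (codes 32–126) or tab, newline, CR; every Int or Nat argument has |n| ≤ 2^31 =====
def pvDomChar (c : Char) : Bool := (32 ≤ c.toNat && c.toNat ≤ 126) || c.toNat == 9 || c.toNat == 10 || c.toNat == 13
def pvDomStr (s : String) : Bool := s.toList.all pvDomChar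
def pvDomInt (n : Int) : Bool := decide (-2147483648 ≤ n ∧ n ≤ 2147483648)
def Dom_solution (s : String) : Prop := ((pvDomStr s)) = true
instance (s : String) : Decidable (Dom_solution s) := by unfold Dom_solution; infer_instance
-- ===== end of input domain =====

-- B replaces A's set of overlapping 3-char windows (built via slicing, then max()) by a single
-- run-length scan keeping only a running maximum; same return value on Pre_ (A raises ValueError
-- on strings with a run of ≥ 3 equal non-digit characters, which Pre_ excludes).

-- ===== PORT A =====
-- loop body of A's 'for i in range(len(s) - 2)'; the Option accumulator is none once int() raised
def solutionStep (cs : List Char) (acc : Option (PySem.Set Int)) (i : Int) : Option (PySem.Set Int) :=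
  match acc with
  | none => none
  | some cool =>
    let sub := PySem.List.slice cs (some i) (some (i + 3))
    -- substring[0] == substring[1] == substring[2]; sub always has length 3 here, so pyGetD is exact
    if PySem.List.pyGetD sub 0 ' ' == PySem.List.pyGetD sub 1 ' '
        && PySem.List.pyGetD sub 1 ' ' == PySem.List.pyGetD sub 2 ' ' then
      match PySem.Int.ofChars? sub with
      | none => none                                -- int(substring) raised ValueError
      | some v => some (PySem.Set.add cool v)
    else some cool

def solution (s : String) : Int :=
  match (PySem.List.pyRange 0 ((s.toList.length : Int) - 2) 1).foldl (solutionStep s.toList) (some PySem.Set.empty) with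
  | none => 0                                       -- Python raises ValueError here; excluded by Pre_solution
  | some cool => if cool = [] then -1 else (PySem.List.max? cool (fun x => x)).getD 0

-- ===== PORT B =====
-- loop body of B's single pass; state = (best, run, prev), none once int() raised
def solutionAltStep (st : Option (Option Int × Int × Option Char)) (ch : Char) :
    Option (Option Int × Int × Option Char) :=
  match st with
  | none => none
  | some (best, run, prev) =>
    let run' : Int := if some ch == prev then run + 1 else 1
    if 3 ≤ run' then
      match PySem.Int.ofChars? [ch] with
      | none => none                                -- int(ch) raised ValueError
      | some d =>
        let v := d * 111
        match best with
        | none => some (some v, run', some ch)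
        | some b => if b < v then some (some v, run', some ch) else some (some b, run', some ch)
    else some (best, run', some ch)

def solution_alt (s : String) : Int :=
  match s.toList.foldl solutionAltStep (some (none, 0, none)) with
  | none => 0                                       -- Python raises ValueError here; excluded by Pre_solution
  | some (best, _, _) =>
    match best with
    | none => -1
    | some b => b

-- ===== PRECONDITION & SPEC =====
-- the list of overlapping 3-char windows of a string (used only to state Pre_)
def win3 : List Char → List (Char × Char × Char)
  | [] => []
  | a :: rest =>
    (match rest with
     | b :: c :: _ => [(a, b, c)]
     | _ => []) ++ win3 rest

-- Pre_ excludes exactly the strings containing three equal consecutive non-digit characters,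
-- on which A raises ValueError from int(substring).
def Pre_solution (s : String) : Prop :=
  ∀ w ∈ win3 s.toList, w.1 = w.2.1 → w.2.1 = w.2.2 → w.2.2.isDigit = true
instance (s : String) : Decidable (Pre_solution s) := by unfold Pre_solution; infer_instance

def pvWitness_solution : String := "ab111c"

def Spec_solution (s : String) (out : Int) : Prop := out = solution_alt s
instance (s : String) (out : Int) : Decidable (Spec_solution s out) := by unfold Spec_solution; infer_instance

-- ===== CLAIM (what is proved, stated in full; the proofs are below) =====
def Claim_equal_solution : Prop := ∀ (s : String), Dom_solution s → Pre_solution s → Spec_solution s (solution s)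

-- ===== LEMMAS AND PROOFS =====

lemma win3_cons (a b c : Char) (t : List Char) :
    win3 (a :: b :: c :: t) = (a, b, c) :: win3 (b :: c :: t) := by
  simp [win3]

-- a digit character is one of the ten digit literals
lemma digit_mem (c : Char) (h : c.isDigit = true) :
    c ∈ ['0', '1', '2', '3', '4', '5', '6', '7', '8', '9'] := by
  simp only [Char.isDigit, decide_eq_true_eq, Bool.and_eq_true, ge_iff_le] at h
  obtain ⟨h1, h2⟩ := h
  have h1' : 48 ≤ c.val.toNat := UInt32.le_iff_toNat_le.mp h1
  have h2' : c.val.toNat ≤ 57 := UInt32.le_iff_toNat_le.mp h2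
  have key : ∀ d : Char, c.val.toNat = d.val.toNat → c = d :=
    fun d hh => Char.ext (UInt32.toNat_inj.mp hh)
  have h : c.val.toNat = 48 ∨ c.val.toNat = 49 ∨ c.val.toNat = 50 ∨ c.val.toNat = 51 ∨
      c.val.toNat = 52 ∨ c.val.toNat = 53 ∨ c.val.toNat = 54 ∨ c.val.toNat = 55 ∨
      c.val.toNat = 56 ∨ c.val.toNat = 57 := by omega
  rcases h with h|h|h|h|h|h|h|h|h|h
  · simp [key '0' (by rw [h]; decide)]
  · simp [key '1' (by rw [h]; decide)]
  · simp [key '2' (by rw [h]; decide)]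
  · simp [key '3' (by rw [h]; decide)]
  · simp [key '4' (by rw [h]; decide)]
  · simp [key '5' (by rw [h]; decide)]
  · simp [key '6' (by rw [h]; decide)]
  · simp [key '7' (by rw [h]; decide)]
  · simp [key '8' (by rw [h]; decide)]
  · simp [key '9' (by rw [h]; decide)]

-- int("c") and int("ccc") for a digit character c
lemma ofChars_digit (c : Char) (h : c.isDigit = true) :
    ∃ d : Int, PySem.Int.ofChars? [c] = some d ∧ PySem.Int.ofChars? [c, c, c] = some (d * 111) := by
  have := digit_mem c h
  fin_cases this
  · exact ⟨0, by decide, by decide⟩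
  · exact ⟨1, by decide, by decide⟩
  · exact ⟨2, by decide, by decide⟩
  · exact ⟨3, by decide, by decide⟩
  · exact ⟨4, by decide, by decide⟩
  · exact ⟨5, by decide, by decide⟩
  · exact ⟨6, by decide, by decide⟩
  · exact ⟨7, by decide, by decide⟩
  · exact ⟨8, by decide, by decide⟩
  · exact ⟨9, by decide, by decide⟩

-- A's loop body re-expressed on a window triple (used only in the proofs)
def astepW (acc : Option (PySem.Set Int)) (w : Char × Char × Char) : Option (PySem.Set Int) :=
  match acc with
  | none => none
  | some cool =>
    if w.1 == w.2.1 && w.2.1 == w.2.2 then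
      match PySem.Int.ofChars? [w.1, w.2.1, w.2.2] with
      | none => none
      | some v => some (PySem.Set.add cool v)
    else some cool

-- the list of 3-slices of cs is the list of window triples
lemma range_windows : ∀ cs : List Char,
    (List.range (cs.length - 2)).map (fun i => (cs.drop i).take 3) =
      (win3 cs).map (fun w => [w.1, w.2.1, w.2.2]) := by
  intro cs
  induction cs with
  | nil => simp [win3]
  | cons a rest ih =>
    match rest with
    | [] => simp [win3]
    | [b] => simp [win3]
    | b :: c :: t =>
      have hlen : (a :: b :: c :: t).length - 2 = (t.length + 1) := by simp
      have hlen' : (b :: c :: t).length - 2 = t.length := by simp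
      rw [win3_cons, hlen, List.range_succ_eq_map, List.map_cons, List.map_map, List.map_cons]
      refine List.cons_eq_cons.mpr ⟨by simp, ?_⟩
      rw [← ih, hlen']
      simp [Function.comp]

-- A's loop body on an already-extracted 3-slice (proof helper)
def fstep (acc : Option (PySem.Set Int)) (sub : List Char) : Option (PySem.Set Int) :=
  match acc with
  | none => none
  | some cool =>
    if PySem.List.pyGetD sub 0 ' ' == PySem.List.pyGetD sub 1 ' '
        && PySem.List.pyGetD sub 1 ' ' == PySem.List.pyGetD sub 2 ' ' then
      match PySem.Int.ofChars? sub with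
      | none => none
      | some v => some (PySem.Set.add cool v)
    else some cool

lemma foldl_ext {α β : Type} {f g : α → β → α} (h : ∀ a b, f a b = g a b) :
    ∀ (l : List β) (init : α), l.foldl f init = l.foldl g init := by
  intro l
  induction l with
  | nil => intro init; rfl
  | cons x t ih => intro init; rw [List.foldl_cons, List.foldl_cons, h, ih]

-- A's index loop equals the fold of astepW over the window list
lemma loop_eq (cs : List Char) (S : PySem.Set Int) :
    (PySem.List.pyRange 0 ((cs.length : Int) - 2) 1).foldl (solutionStep cs) (some S) =
      (win3 cs).foldl astepW (some S) := by
  rw [PySem.List.pyRange_one]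
  have htn : (((cs.length : Int) - 2) - 0).toNat = cs.length - 2 := by omega
  rw [htn, List.foldl_map]
  have hstep : ∀ (acc : Option (PySem.Set Int)) (k : Nat),
      solutionStep cs acc ((0 : Int) + (k : Int)) = fstep acc ((cs.drop k).take 3) := by
    intro acc k
    have hsl : PySem.List.slice cs (some ((0 : Int) + (k : Int))) (some ((0 : Int) + (k : Int) + 3)) =
        (cs.drop k).take 3 := by
      have h3 : ((0 : Int) + (k : Int) + 3) = ((k : Int) + ((3 : Nat) : Int)) := by push_cast; ring
      have h0 : ((0 : Int) + (k : Int)) = ((k : Nat) : Int) := by ring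
      rw [h3, h0, PySem.List.slice_natCast_add]
    simp only [solutionStep, fstep, hsl]
  rw [foldl_ext hstep]
  rw [← List.foldl_map, range_windows, List.foldl_map]
  apply foldl_ext
  intro acc w
  obtain ⟨a, b, c⟩ := w
  cases acc with
  | none => rfl
  | some cool => simp [fstep, astepW, PySem.List.pyGetD]

-- main invariant: the run-length scan tracks the maximum of A's window set
lemma core : ∀ (rest : List Char) (p1 p2 : Char) (S : PySem.Set Int) (bst : Option Int) (run : Int),
    (∀ w ∈ win3 (p1 :: p2 :: rest), w.1 = w.2.1 → w.2.1 = w.2.2 → w.2.2.isDigit = true) →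
    1 ≤ run → (2 ≤ run ↔ p1 = p2) →
    (bst = none → S = []) →
    (∀ b, bst = some b → b ∈ S ∧ ∀ x ∈ S, x ≤ b) →
    ∃ (S' : PySem.Set Int) (st' : Option Int × Int × Option Char),
      (win3 (p1 :: p2 :: rest)).foldl astepW (some S) = some S' ∧
      rest.foldl solutionAltStep (some (bst, run, some p2)) = some st' ∧
      (st'.1 = none → S' = []) ∧ (∀ b, st'.1 = some b → b ∈ S' ∧ ∀ x ∈ S', x ≤ b) := by
  intro rest
  induction rest with
  | nil =>
    intro p1 p2 S bst run _ _ _ h3 h4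
    exact ⟨S, (bst, run, some p2), by simp [win3], rfl, h3, h4⟩
  | cons ch rest' ih =>
    intro p1 p2 S bst run hpre h1 h2 h3 h4
    rw [win3_cons, List.foldl_cons, List.foldl_cons]
    have hpre' : ∀ w ∈ win3 (p2 :: ch :: rest'), w.1 = w.2.1 → w.2.1 = w.2.2 → w.2.2.isDigit = true := by
      intro w hw
      exact hpre w (by rw [win3_cons]; exact List.mem_cons_of_mem _ hw)
    by_cases hcp : ch = p2
    · by_cases hpp : p1 = p2
      · -- the window fires on both sides
        have hdig : ch.isDigit = true := by
          have := hpre (p1, p2, ch) (by rw [win3_cons]; exact List.mem_cons_self)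
          exact this hpp hcp.symm
        obtain ⟨d, hd1, hd3⟩ := ofChars_digit ch hdig
        have hrge : 2 ≤ run := h2.mpr hpp
        have hA : astepW (some S) (p1, p2, ch) = some (PySem.Set.add S (d * 111)) := by
          simp only [astepW]
          rw [if_pos (by simp [hpp, hcp.symm])]
          rw [hpp, hcp.symm, hd3]
        have hrun : (if some ch == some p2 then run + 1 else 1) = run + 1 := by simp [hcp]
        set bst' : Option Int := match bst with
          | none => some (d * 111)
          | some b => if b < d * 111 then some (d * 111) else some b with hbst'
        have hB : solutionAltStep (some (bst, run, some p2)) ch = some (bst', run + 1, some ch) := by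
          simp only [solutionAltStep, hrun]
          rw [if_pos (by omega : (3 : Int) ≤ run + 1)]
          · rw [hd1]
            cases bst with
            | none => simp [hbst']
            | some b => by_cases hbv : b < d * 111 <;> simp [hbst', hbv]
        rw [hA, hB]
        apply ih p2 ch (PySem.Set.add S (d * 111)) bst' (run + 1) hpre' (by omega)
          (Iff.intro (fun _ => hcp.symm) (fun _ => by omega))
        · intro hb
          cases bst with
          | none => simp [hbst'] at hb
          | some b => simp only [hbst'] at hb; split at hb <;> simp_all
        · intro b hb
          cases bst with
          | none =>
            simp only [hbst', Option.some.injEq] at hb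
            have hS : S = [] := h3 rfl
            subst hS
            constructor
            · rw [← hb]; simp
            · intro x hx
              rw [PySem.Set.mem_add] at hx
              rcases hx with hx | hx
              · simp at hx
              · omega
          | some b0 =>
            obtain ⟨hmem, hmax⟩ := h4 b0 rfl
            simp only [hbst'] at hb
            by_cases hbv : b0 < d * 111
            · rw [if_pos hbv, Option.some.injEq] at hb
              constructor
              · rw [← hb]; simp [PySem.Set.mem_add]
              · intro x hx
                rw [PySem.Set.mem_add] at hx
                rcases hx with hx | hx
                · have := hmax x hx; omega
                · omega
            · rw [if_neg hbv, Option.some.injEq] at hb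
              constructor
              · rw [PySem.Set.mem_add]; left; rw [← hb]; exact hmem
              · intro x hx
                rw [PySem.Set.mem_add] at hx
                rcases hx with hx | hx
                · rw [← hb]; exact hmax x hx
                · omega
      · -- ch = p2 but p1 ≠ p2: window does not fire, run grows
        have hA : astepW (some S) (p1, p2, ch) = some S := by
          simp only [astepW]
          rw [if_neg (by simp [hpp])]
        have hrun : (if some ch == some p2 then run + 1 else 1) = run + 1 := by simp [hcp]
        have hB : solutionAltStep (some (bst, run, some p2)) ch = some (bst, run + 1, some ch) := by
          simp only [solutionAltStep, hrun]
          rw [if_neg (by have := h2.mp; intro hc; exact hpp (this (by omega)))]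
        rw [hA, hB]
        exact ih p2 ch S bst (run + 1) hpre' (by omega)
          (Iff.intro (fun _ => hcp.symm) (fun _ => by omega)) h3 h4
    · -- ch ≠ p2: run resets to 1, window cannot fire
      have hA : astepW (some S) (p1, p2, ch) = some S := by
        simp only [astepW]
        rw [if_neg (by simp; intro _ h; exact hcp h.symm)]
      have hrun : (if some ch == some p2 then run + 1 else 1) = 1 := by simp [hcp]
      have hB : solutionAltStep (some (bst, run, some p2)) ch = some (bst, 1, some ch) := by
        simp only [solutionAltStep, hrun]
        rw [if_neg (by omega)]
      rw [hA, hB]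
      exact ih p2 ch S bst 1 hpre' le_rfl
        (Iff.intro (fun h => by omega) (fun h => absurd h.symm hcp)) h3 h4

-- ===== VERDICT (by name: the statement is the Claim_ definition above) =====
theorem solution_spec : Claim_equal_solution := by
  intro s _ hpre
  unfold Spec_solution solution solution_alt
  match hcs : s.toList with
  | [] =>
    simp [PySem.List.pyRange_one_eq_nil]
  | [a] =>
    have h0 : PySem.List.pyRange 0 (([a].length : Int) - 2) 1 = [] :=
      PySem.List.pyRange_one_eq_nil (by simp)
    simp only [h0, List.foldl_nil, List.foldl_cons, solutionAltStep]
    norm_num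
  | a :: b :: rest =>
    rw [loop_eq]
    have hstep1 : solutionAltStep (some (none, 0, none)) a = some (none, 1, some a) := by
      simp [solutionAltStep]
    set r2 : Int := if some b == some a then (2 : Int) else 1 with hr2
    have hstep2 : solutionAltStep (some (none, 1, some a)) b = some (none, r2, some b) := by
      simp only [solutionAltStep, hr2]
      by_cases hba : b = a <;> simp [hba]
    rw [List.foldl_cons, List.foldl_cons, hstep1, hstep2]
    have hpre' : ∀ w ∈ win3 (a :: b :: rest), w.1 = w.2.1 → w.2.1 = w.2.2 → w.2.2.isDigit = true := by
      rw [← hcs]; exact hpre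
    obtain ⟨S', st', hA, hB, hinv1, hinv2⟩ := core rest a b PySem.Set.empty none r2
      hpre' (by simp [hr2]; split <;> omega)
      (by constructor <;> intro h
          · simp only [hr2] at h; by_contra hab
            rw [if_neg (by simp; exact fun hh => hab hh.symm)] at h; omega
          · simp [hr2, h])
      (fun _ => rfl) (by intro b hb; simp at hb)
    rw [hA, hB]
    obtain ⟨bst', r', pr'⟩ := st'
    cases hb : bst' with
    | none =>
      have hS : S' = [] := hinv1 (by simpa using hb)
      show (if S' = [] then (-1 : Int) else (PySem.List.max? S' (fun x => x)).getD 0) = -1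
      rw [if_pos hS]
    | some bv =>
      obtain ⟨hmem, hmax⟩ := hinv2 bv (by simpa using hb)
      have hne : S' ≠ [] := by intro h; rw [h] at hmem; simp at hmem
      show (if S' = [] then (-1 : Int) else (PySem.List.max? S' (fun x => x)).getD 0) = bv
      rw [if_neg hne]
      have hms : ∃ m, PySem.List.max? S' (fun x => x) = some m := by
        cases hm : PySem.List.max? S' (fun x => x) with
        | none => exact absurd (((PySem.List.max?_eq_none_iff _ _).mp hm)) hne
        | some m => exact ⟨m, rfl⟩
      obtain ⟨m, hm⟩ := hms
      have h1 : m ∈ S' := PySem.List.max?_mem hm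
      have h2 : ∀ y ∈ S', y ≤ m := PySem.List.max?_isMax hm
      have : m = bv := le_antisymm (hmax m h1) (h2 bv hmem)
      simp [hm, this]
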